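-- pv_equiv track=rewrite | github.com/onera/Cassiopee | Cassiopee/Converter/Converter/Distributed.py | splitGraph
-- ===== SOURCE A (Python) =====
-- def splitGraph(graph):
--     graphs = []
--     c = 0; goon = True
--     while goon:
--         g = {}
--         goon = False
--         for p1 in graph:
--             g[p1] = {}
--             for p2 in graph[p1]:
--                 l = graph[p1][p2]
--                 if len(l) > c: g[p1][p2] = [l[c]]; goon = True
--                 else: g[p1][p2] = []
--         if goon: graphs.append(g)
--         c += 1
--     return graphs
-- ===== SOURCE B (Python) =====
-- def splitGraph(graph):
--     maxLen = max((len(l) for d in graph.values() for l in d.values()), default=0)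
--     return [{p1: {p2: l[c:c+1] for p2, l in d.items()} for p1, d in graph.items()}
--             for c in range(maxLen)]
-- ===== Notes on version B (the rewrite author's own statement) =====
-- stated objective: simpler
-- what changed: B precomputes the maximum list length and builds all slices by a closed-count comprehension using l[c:c+1], instead of A's open-ended while loop driven by a 'goon' termination flag threaded through nested loops with an if/else per cell.
import Mathlib
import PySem

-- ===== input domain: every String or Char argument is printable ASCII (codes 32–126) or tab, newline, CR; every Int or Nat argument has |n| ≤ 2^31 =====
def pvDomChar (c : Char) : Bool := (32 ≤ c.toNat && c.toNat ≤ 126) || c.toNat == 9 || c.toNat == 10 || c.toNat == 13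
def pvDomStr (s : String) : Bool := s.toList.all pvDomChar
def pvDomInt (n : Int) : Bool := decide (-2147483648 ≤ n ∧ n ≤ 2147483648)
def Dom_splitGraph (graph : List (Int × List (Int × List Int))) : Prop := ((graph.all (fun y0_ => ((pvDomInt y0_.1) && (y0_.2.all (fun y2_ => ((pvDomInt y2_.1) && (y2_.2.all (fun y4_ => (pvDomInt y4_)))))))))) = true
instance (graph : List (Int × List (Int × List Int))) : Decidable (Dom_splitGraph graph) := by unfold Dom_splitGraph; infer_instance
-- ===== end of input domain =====

-- B changes the decomposition (closed slice count + slicing instead of a termination-flag while loop); same cost.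

-- ===== PORT A =====
-- one pass of A's while-body at index c: builds the slice dict g and the 'goon' flag
def splitGraphSlice (graph : List (Int × List (Int × List Int))) (c : Nat) :
    List (Int × List (Int × List Int)) × Bool :=
  graph.foldl (fun acc p1 =>
    let inner := p1.2.foldl (fun acc2 p2 =>
      if c < p2.2.length then (acc2.1 ++ [(p2.1, [p2.2.getD c 0])], true)
      else (acc2.1 ++ [(p2.1, ([] : List Int))], acc2.2)) (([] : List (Int × List Int)), acc.2)
    (acc.1 ++ [(p1.1, inner.1)], inner.2)) (([] : List (Int × List (Int × List Int))), false)

-- termination bound for A's while loop (also B's maxLen)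
def pvMaxLen (graph : List (Int × List (Int × List Int))) : Nat :=
  graph.foldl (fun m p1 => p1.2.foldl (fun m2 p2 => max m2 p2.2.length) m) 0

-- A's while loop, starting at index c; fuel only guards totality (the loop stops itself via goon)
def splitGraphLoop (graph : List (Int × List (Int × List Int))) :
    Nat → Nat → List (List (Int × List (Int × List Int)))
  | 0, _ => []
  | fuel + 1, c =>
    let gg := splitGraphSlice graph c
    if gg.2 then gg.1 :: splitGraphLoop graph fuel (c + 1) else []

def splitGraph (graph : List (Int × List (Int × List Int))) : List (List (Int × List (Int × List Int))) :=
  splitGraphLoop graph (pvMaxLen graph + 1) 0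

-- ===== PORT B =====
def splitGraph_alt (graph : List (Int × List (Int × List Int))) : List (List (Int × List (Int × List Int))) :=
  let maxLen := pvMaxLen graph
  (List.range maxLen).map (fun c =>
    graph.map (fun p1 => (p1.1, p1.2.map (fun p2 =>
      (p2.1, PySem.List.slice p2.2 (some (c : Int)) (some ((c : Int) + 1)))))))

-- ===== PRECONDITION & SPEC =====
def Spec_splitGraph (graph : List (Int × List (Int × List Int))) (out : List (List (Int × List (Int × List Int)))) : Prop := out = splitGraph_alt graph
instance (graph : List (Int × List (Int × List Int))) (out : List (List (Int × List (Int × List Int)))) : Decidable (Spec_splitGraph graph out) := by unfold Spec_splitGraph; infer_instance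

-- ===== CLAIM (what is proved, stated in full; the proofs are below) =====
def Claim_equal_splitGraph : Prop := ∀ (graph : List (Int × List (Int × List Int))), Dom_splitGraph graph → Spec_splitGraph graph (splitGraph graph)

-- ===== LEMMAS AND PROOFS =====

-- combined characterisation of the inner fold of one while-body pass
theorem splitGraphSlice_inner_eq (c : Nat) (d : List (Int × List Int)) (a0 : List (Int × List Int)) (b0 : Bool) :
    (d.foldl (fun acc2 p2 =>
      if c < p2.2.length then (acc2.1 ++ [(p2.1, [p2.2.getD c 0])], true)
      else (acc2.1 ++ [(p2.1, ([] : List Int))], acc2.2)) (a0, b0))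
      = (a0 ++ d.map (fun p2 => (p2.1, if c < p2.2.length then [p2.2.getD c 0] else [])),
         b0 || d.any (fun p2 => c < p2.2.length)) := by
  induction d generalizing a0 b0 with
  | nil => simp
  | cons h t ih =>
    simp only [List.foldl_cons, List.map_cons, List.any_cons]
    by_cases hc : c < h.2.length
    · rw [if_pos hc, ih]
      simp [hc]
    · rw [if_neg hc, ih]
      simp [hc]

-- combined characterisation of the outer fold of one while-body pass
theorem splitGraphSlice_eq' (graph : List (Int × List (Int × List Int))) (c : Nat) (a0 : List (Int × List (Int × List Int))) (b0 : Bool) :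
    (graph.foldl (fun acc p1 =>
      let inner := p1.2.foldl (fun acc2 p2 =>
        if c < p2.2.length then (acc2.1 ++ [(p2.1, [p2.2.getD c 0])], true)
        else (acc2.1 ++ [(p2.1, ([] : List Int))], acc2.2)) (([] : List (Int × List Int)), acc.2)
      (acc.1 ++ [(p1.1, inner.1)], inner.2)) (a0, b0))
      = (a0 ++ graph.map (fun p1 => (p1.1, p1.2.map (fun p2 => (p2.1, if c < p2.2.length then [p2.2.getD c 0] else [])))),
         b0 || graph.any (fun p1 => p1.2.any (fun p2 => c < p2.2.length))) := by
  induction graph generalizing a0 b0 with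
  | nil => simp
  | cons h t ih =>
    simp only [List.foldl_cons, List.map_cons, List.any_cons]
    rw [splitGraphSlice_inner_eq, ih]
    simp [Bool.or_assoc]

-- monotonicity facts about the foldl-max computing pvMaxLen
theorem foldMaxInner_init_le (d : List (Int × List Int)) (m : Nat) :
    m ≤ d.foldl (fun m2 p2 => max m2 p2.2.length) m := by
  induction d generalizing m with
  | nil => simp
  | cons h t ih => exact le_trans (le_max_left m h.2.length) (ih _)

theorem foldMaxOuter_init_le (graph : List (Int × List (Int × List Int))) (m : Nat) :
    m ≤ graph.foldl (fun m p1 => p1.2.foldl (fun m2 p2 => max m2 p2.2.length) m) m := by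
  induction graph generalizing m with
  | nil => simp
  | cons h t ih => exact le_trans (foldMaxInner_init_le h.2 m) (ih _)

theorem foldMaxInner_lt (d : List (Int × List Int)) (c m : Nat)
    (h : d.any (fun p2 => c < p2.2.length) = true) :
    c < d.foldl (fun m2 p2 => max m2 p2.2.length) m := by
  induction d generalizing m with
  | nil => simp at h
  | cons h2 t ih =>
    simp only [List.any_cons, Bool.or_eq_true, decide_eq_true_eq] at h
    rcases h with h | h
    · exact lt_of_lt_of_le (lt_of_lt_of_le h (le_max_right m h2.2.length)) (foldMaxInner_init_le t _)
    · exact ih _ (by simpa using h)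

theorem foldMaxOuter_lt (graph : List (Int × List (Int × List Int))) (c m : Nat)
    (h : graph.any (fun p1 => p1.2.any (fun p2 => c < p2.2.length)) = true) :
    c < graph.foldl (fun m p1 => p1.2.foldl (fun m2 p2 => max m2 p2.2.length) m) m := by
  induction graph generalizing m with
  | nil => simp at h
  | cons h1 t ih =>
    simp only [List.any_cons, Bool.or_eq_true] at h
    rcases h with h | h
    · exact lt_of_lt_of_le (foldMaxInner_lt h1.2 c m h) (foldMaxOuter_init_le t _)
    · exact ih _ h

theorem splitGraphSlice_goon_lt (graph : List (Int × List (Int × List Int))) (c : Nat)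
    (h : (splitGraphSlice graph c).2 = true) : c < pvMaxLen graph := by
  unfold splitGraphSlice at h
  rw [splitGraphSlice_eq'] at h
  simp only [Bool.false_or] at h
  exact foldMaxOuter_lt graph c 0 h

-- the python slice l[c:c+1] equals A's guarded singleton
theorem slice_one (l : List Int) (c : Nat) :
    PySem.List.slice l (some (c : Int)) (some ((c : Int) + 1))
      = if c < l.length then [l.getD c 0] else [] := by
  have h1 : ((c : Int) + 1) = ((c + 1 : Nat) : Int) := by push_cast; ring
  rw [h1, PySem.List.slice_natCast]
  have h2 : c + 1 - c = 1 := by omega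
  rw [h2]
  by_cases hc : c < l.length
  · rw [if_pos hc, List.take_one_drop_eq_of_lt_length hc]
    rw [List.getD_eq_getElem?_getD, List.getElem?_eq_getElem hc, Option.getD_some,
      List.get_eq_getElem]
  · rw [if_neg hc, List.drop_eq_nil_of_le (by omega : l.length ≤ c)]
    simp

-- the slice dict built by one pass of A's loop equals B's map of python slices
theorem splitGraphSlice_fst_eq (graph : List (Int × List (Int × List Int))) (c : Nat) :
    (splitGraphSlice graph c).1
      = graph.map (fun p1 => (p1.1, p1.2.map (fun p2 =>
          (p2.1, PySem.List.slice p2.2 (some (c : Int)) (some ((c : Int) + 1)))))) := by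
  unfold splitGraphSlice
  rw [splitGraphSlice_eq']
  simp [slice_one]

theorem foldMaxInner_le (d : List (Int × List Int)) (c : Nat) :
    ∀ (m : Nat), (∀ p2 ∈ d, p2.2.length ≤ c) → m ≤ c →
      d.foldl (fun m2 p2 => max m2 p2.2.length) m ≤ c := by
  induction d with
  | nil => intro m _ hm; simpa
  | cons h2 t ih =>
    intro m hd hm
    exact ih _ (fun p2 hp2 => hd p2 (List.mem_cons_of_mem _ hp2))
      (by show max m h2.2.length ≤ c; have := hd h2 List.mem_cons_self; omega)

theorem foldMaxOuter_le (graph : List (Int × List (Int × List Int))) (c : Nat) :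
    ∀ (m : Nat), (∀ p1 ∈ graph, ∀ p2 ∈ p1.2, p2.2.length ≤ c) → m ≤ c →
      graph.foldl (fun m p1 => p1.2.foldl (fun m2 p2 => max m2 p2.2.length) m) m ≤ c := by
  induction graph with
  | nil => intro m _ hm; simpa
  | cons h1 t ih =>
    intro m hall hm
    exact ih _ (fun p1 hp1 => hall p1 (List.mem_cons_of_mem _ hp1))
      (foldMaxInner_le h1.2 c m (hall h1 List.mem_cons_self) hm)

theorem splitGraphSlice_goon_iff (graph : List (Int × List (Int × List Int))) (c : Nat) :
    (splitGraphSlice graph c).2 = true ↔ c < pvMaxLen graph := by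
  constructor
  · exact splitGraphSlice_goon_lt graph c
  · intro h
    by_contra hfalse
    have hany : (splitGraphSlice graph c).2 = false := by
      revert hfalse; cases (splitGraphSlice graph c).2 <;> simp
    unfold splitGraphSlice at hany
    rw [splitGraphSlice_eq'] at hany
    simp only [Bool.false_or] at hany
    have hall : ∀ p1 ∈ graph, ∀ p2 ∈ p1.2, p2.2.length ≤ c := by
      intro p1 hp1 p2 hp2
      have h2 := (List.any_eq_false.mp hany) p1 hp1
      have h2' : (p1.2.any fun p2 => decide (c < p2.2.length)) = false := by
        cases hb : (p1.2.any fun p2 => decide (c < p2.2.length)) with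
        | false => rfl
        | true => exact absurd hb h2
      have h3 := (List.any_eq_false.mp h2') p2 hp2
      have h4 : ¬ c < p2.2.length := by simpa using h3
      omega
    have hle : pvMaxLen graph ≤ c := foldMaxOuter_le graph c 0 hall (by omega)
    omega

theorem splitGraphLoop_eq (graph : List (Int × List (Int × List Int))) :
    ∀ (fuel c : Nat), pvMaxLen graph ≤ c + fuel →
      splitGraphLoop graph fuel c
        = (List.range' c (pvMaxLen graph - c)).map (fun i =>
            graph.map (fun p1 => (p1.1, p1.2.map (fun p2 =>
              (p2.1, PySem.List.slice p2.2 (some (i : Int)) (some ((i : Int) + 1))))))) := by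
  intro fuel
  induction fuel with
  | zero =>
    intro c h
    have h0 : pvMaxLen graph - c = 0 := by omega
    rw [h0]
    simp [splitGraphLoop]
  | succ n ih =>
    intro c h
    simp only [splitGraphLoop]
    by_cases hg : (splitGraphSlice graph c).2 = true
    · have hc := (splitGraphSlice_goon_iff graph c).1 hg
      rw [if_pos hg, ih (c + 1) (by omega)]
      have hr : pvMaxLen graph - c = (pvMaxLen graph - (c + 1)) + 1 := by omega
      rw [hr, List.range'_succ]
      simp [splitGraphSlice_fst_eq]
    · have hc : ¬ c < pvMaxLen graph := fun hlt => hg ((splitGraphSlice_goon_iff graph c).2 hlt)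
      have h0 : pvMaxLen graph - c = 0 := by omega
      rw [if_neg hg, h0]
      simp

-- ===== VERDICT (by name: the statement is the Claim_ definition above) =====
theorem splitGraph_spec : Claim_equal_splitGraph := by
  intro graph _
  unfold Spec_splitGraph splitGraph splitGraph_alt
  rw [splitGraphLoop_eq graph (pvMaxLen graph + 1) 0 (by omega)]
  simp [List.range_eq_range']
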